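-- pv_equiv track=rewrite | github.com/Prymoy/- | lab6/lab6.3.py | get_smallest_divisors
-- ===== SOURCE A (Python) =====
-- def get_smallest_divisors(n):
--     """
--     Возвращает список из 5 наименьших делителей числа n.
--     """
--     divisors = []
--     divisor_candidate = 2
--
--     while len(divisors) < 5 and divisor_candidate <= n:
--         if n % divisor_candidate == 0:
--             divisors.append(divisor_candidate)
--         divisor_candidate += 1
--
--     return divisors
-- ===== SOURCE B (Python) =====
-- def get_smallest_divisors(n):
--     """
--     Возвращает список из 5 наименьших делителей числа n.
--     """
--     if n < 2:
--         return []
--     small = []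
--     large = [n]            # complement of the divisor 1
--     d = 2
--     while d * d <= n:
--         if n % d == 0:
--             small.append(d)
--             if d * d != n:
--                 large.append(n // d)
--         d += 1
--     return (small + large[::-1])[:5]
-- ===== Notes on version B (the rewrite author's own statement) =====
-- stated objective: faster
-- what changed: Instead of scanning every candidate 2..n, B trial-divides only up to sqrt(n), collecting each small divisor and its complement n//d, and assembles the sorted divisor list as small-part ++ reversed complements, taking the first 5.
import Mathlib
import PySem

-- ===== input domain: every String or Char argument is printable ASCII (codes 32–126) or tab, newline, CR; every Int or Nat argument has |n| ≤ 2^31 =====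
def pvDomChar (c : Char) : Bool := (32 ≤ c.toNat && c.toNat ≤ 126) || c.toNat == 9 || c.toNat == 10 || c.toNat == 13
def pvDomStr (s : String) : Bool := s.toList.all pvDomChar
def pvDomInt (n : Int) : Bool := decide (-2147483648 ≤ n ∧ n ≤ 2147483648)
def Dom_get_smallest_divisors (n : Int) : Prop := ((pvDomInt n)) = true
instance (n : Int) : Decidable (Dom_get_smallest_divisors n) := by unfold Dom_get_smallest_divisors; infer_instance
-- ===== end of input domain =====

-- B replaces A's linear scan of the candidates 2..n by trial division up to sqrt(n),
-- collecting each small divisor and its complement n//d (objective: faster).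
-- The fuel argument of each loop is only a structural totality guard; it is chosen
-- large enough that it never cuts the loop short.

-- ===== PORT A =====
-- the while loop: `while len(divisors) < 5 and divisor_candidate <= n: ...`
def pvLoopA (fuel : Nat) (n c : Int) (acc : List Int) : List Int :=
  match fuel with
  | 0 => acc
  | fuel + 1 =>
    if acc.length < 5 ∧ c ≤ n then
      pvLoopA fuel n (c + 1) (if PySem.Int.mod n c = 0 then acc ++ [c] else acc)
    else acc

def get_smallest_divisors (n : Int) : List Int := pvLoopA (n - 1).toNat n 2 []

-- ===== PORT B =====
-- the while loop: `while d*d <= n: if n % d == 0: small.append(d); if d*d != n: large.append(n//d); d += 1`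
def pvLoopB (fuel : Nat) (n d : Int) (small large : List Int) : List Int × List Int :=
  match fuel with
  | 0 => (small, large)
  | fuel + 1 =>
    if d * d ≤ n then
      if PySem.Int.mod n d = 0 then
        pvLoopB fuel n (d + 1) (small ++ [d])
          (if d * d ≠ n then large ++ [PySem.Int.floordiv n d] else large)
      else pvLoopB fuel n (d + 1) small large
    else (small, large)

def get_smallest_divisors_alt (n : Int) : List Int :=
  if n < 2 then []
  else
    let p := pvLoopB (n - 1).toNat n 2 [] [n]
    (p.1 ++ p.2.reverse).take 5

-- ===== PRECONDITION & SPEC =====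
def Spec_get_smallest_divisors (n : Int) (out : List Int) : Prop := out = get_smallest_divisors_alt n
instance (n : Int) (out : List Int) : Decidable (Spec_get_smallest_divisors n out) := by unfold Spec_get_smallest_divisors; infer_instance

-- ===== CLAIM (what is proved, stated in full; the proofs are below) =====
def Claim_equal_get_smallest_divisors : Prop := ∀ (n : Int), Dom_get_smallest_divisors n → Spec_get_smallest_divisors n (get_smallest_divisors n)

-- ===== LEMMAS AND PROOFS =====

-- integer range [c, c+len) as a list
def intRange (c : Int) : Nat → List Int
  | 0 => []
  | k + 1 => c :: intRange (c + 1) k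

-- the full ascending list of divisors of n in [c, n]
def divList (n c : Int) : List Int := (intRange c (n + 1 - c).toNat).filter (fun d => decide (d ∣ n))

theorem mem_intRange (c : Int) (k : Nat) (x : Int) : x ∈ intRange c k ↔ c ≤ x ∧ x < c + k := by
  induction k generalizing c with
  | zero => simp [intRange]
  | succ k ih =>
    simp only [intRange, List.mem_cons, ih]
    push_cast
    omega

theorem mem_divList (n c x : Int) : x ∈ divList n c ↔ c ≤ x ∧ x ≤ n ∧ x ∣ n := by
  simp only [divList, List.mem_filter, mem_intRange, decide_eq_true_eq]
  constructor
  · rintro ⟨⟨h1, h2⟩, h3⟩; exact ⟨h1, by omega, h3⟩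
  · rintro ⟨h1, h2, h3⟩; exact ⟨⟨h1, by omega⟩, h3⟩

theorem divList_step (n c : Int) (hc : c ≤ n) :
    divList n c = (if c ∣ n then [c] else []) ++ divList n (c + 1) := by
  have hk : (n + 1 - c).toNat = (n + 1 - (c + 1)).toNat + 1 := by omega
  rw [divList, hk]
  show (c :: intRange (c + 1) _).filter _ = _
  rw [List.filter_cons]
  split_ifs with h <;> simp_all [divList]

theorem divList_empty (n c : Int) (hc : n < c) : divList n c = [] := by
  have hk : (n + 1 - c).toNat = 0 := by omega
  simp [divList, hk, intRange]

theorem pairwise_intRange (c : Int) (k : Nat) : (intRange c k).Pairwise (· < ·) := by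
  induction k generalizing c with
  | zero => simp [intRange]
  | succ k ih =>
    refine List.Pairwise.cons ?_ (ih (c + 1))
    intro x hx
    have := (mem_intRange (c + 1) k x).mp hx
    omega

theorem pairwise_divList (n c : Int) : (divList n c).Pairwise (· < ·) :=
  List.Pairwise.sublist List.filter_sublist (pairwise_intRange c _)

-- characterization of A's loop: with enough fuel it appends the next divisors up to 5
theorem pvLoopA_eq (n : Int) (fuel : Nat) : ∀ (c : Int) (acc : List Int), n - c + 1 ≤ (fuel : Int) →
    pvLoopA fuel n c acc = acc ++ (divList n c).take (5 - acc.length) := by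
  induction fuel with
  | zero =>
    intro c acc h
    simp only [Nat.cast_zero] at h
    rw [pvLoopA, divList_empty n c (by omega)]
    simp
  | succ fuel ih =>
    intro c acc h
    rw [pvLoopA]
    by_cases hcon : acc.length < 5 ∧ c ≤ n
    · rw [if_pos hcon, divList_step n c hcon.2]
      obtain ⟨h1, h2⟩ := hcon
      have hfuel : n - (c + 1) + 1 ≤ (fuel : Int) := by push_cast at h ⊢; omega
      by_cases hc : c ∣ n
      · have hm : PySem.Int.mod n c = 0 := (PySem.Int.mod_eq_zero_iff_dvd n c).mpr hc
        rw [if_pos hm, ih (c + 1) (acc ++ [c]) hfuel, if_pos hc]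
        have hlen : 5 - acc.length = (5 - (acc ++ [c]).length) + 1 := by
          simp only [List.length_append, List.length_cons, List.length_nil]
          omega
        rw [hlen]
        simp [List.take_succ_cons]
      · have hm : PySem.Int.mod n c ≠ 0 := fun h' => hc ((PySem.Int.mod_eq_zero_iff_dvd n c).mp h')
        rw [if_neg hm, ih (c + 1) acc hfuel, if_neg hc]
        simp
    · rw [if_neg hcon]
      rcases not_and_or.mp hcon with h1 | h2
      · have : 5 - acc.length = 0 := by omega
        simp [this]
      · rw [divList_empty n c (by omega)]
        simp

theorem A_char (n : Int) : get_smallest_divisors n = (divList n 2).take 5 := by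
  rw [get_smallest_divisors, pvLoopA_eq n (n - 1).toNat 2 [] (by omega)]
  rfl

-- pure versions of B's two accumulators
def Sfun (fuel : Nat) (n d : Int) : List Int :=
  match fuel with
  | 0 => []
  | fuel + 1 =>
    if d * d ≤ n then (if d ∣ n then [d] else []) ++ Sfun fuel n (d + 1) else []

def Lfun (fuel : Nat) (n d : Int) : List Int :=
  match fuel with
  | 0 => []
  | fuel + 1 =>
    if d * d ≤ n then
      (if d ∣ n ∧ d * d ≠ n then [PySem.Int.floordiv n d] else []) ++ Lfun fuel n (d + 1)
    else []

theorem pvLoopB_eq (n : Int) (fuel : Nat) : ∀ (d : Int) (small large : List Int),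
    pvLoopB fuel n d small large = (small ++ Sfun fuel n d, large ++ Lfun fuel n d) := by
  induction fuel with
  | zero =>
    intro d small large
    rw [pvLoopB, Sfun, Lfun]
    simp
  | succ fuel ih =>
    intro d small large
    rw [pvLoopB, Sfun, Lfun]
    by_cases h : d * d ≤ n
    · rw [if_pos h, if_pos h, if_pos h]
      by_cases hm : PySem.Int.mod n d = 0
      · have hdvd : d ∣ n := (PySem.Int.mod_eq_zero_iff_dvd n d).mp hm
        rw [if_pos hm, ih]
        by_cases he : d * d ≠ n
        · simp [hdvd, he]
        · simp [hdvd, he]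
      · have hdvd : ¬ d ∣ n := fun h' => hm ((PySem.Int.mod_eq_zero_iff_dvd n d).mpr h')
        rw [if_neg hm, ih]
        simp [hdvd]
    · rw [if_neg h, if_neg h, if_neg h]
      simp

theorem mem_Sfun (n : Int) (fuel : Nat) : ∀ (d x : Int), 1 ≤ d → n - d + 1 ≤ (fuel : Int) →
    (x ∈ Sfun fuel n d ↔ d ≤ x ∧ x * x ≤ n ∧ x ∣ n) := by
  induction fuel with
  | zero =>
    intro d x hd h
    simp only [Nat.cast_zero] at h
    rw [Sfun]
    simp only [List.not_mem_nil, false_iff]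
    rintro ⟨h1, h2, _⟩
    nlinarith
  | succ fuel ih =>
    intro d x hd h
    rw [Sfun]
    by_cases hle : d * d ≤ n
    · rw [if_pos hle, List.mem_append,
        ih (d + 1) x (by omega) (by push_cast at h ⊢; omega)]
      constructor
      · rintro (hx | ⟨h1, h2, h3⟩)
        · split_ifs at hx with hdvd
          · simp only [List.mem_singleton] at hx
            subst hx
            exact ⟨le_refl _, hle, hdvd⟩
          · simp at hx
        · exact ⟨by omega, h2, h3⟩
      · rintro ⟨h1, h2, h3⟩
        by_cases hx : x = d
        · subst hx; left; simp [h3]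
        · right; exact ⟨by omega, h2, h3⟩
    · rw [if_neg hle]
      simp only [List.not_mem_nil, false_iff]
      rintro ⟨h1, h2, _⟩
      have : d * d ≤ x * x := by nlinarith
      omega

theorem mem_Lfun (n : Int) (fuel : Nat) : ∀ (d x : Int), 1 ≤ d → n - d + 1 ≤ (fuel : Int) →
    (x ∈ Lfun fuel n d ↔ ∃ e, d ≤ e ∧ e * e ≤ n ∧ e ∣ n ∧ e * e ≠ n ∧ x = PySem.Int.floordiv n e) := by
  induction fuel with
  | zero =>
    intro d x hd h
    simp only [Nat.cast_zero] at h
    rw [Lfun]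
    simp only [List.not_mem_nil, false_iff]
    rintro ⟨e, h1, h2, _⟩
    nlinarith
  | succ fuel ih =>
    intro d x hd h
    rw [Lfun]
    by_cases hle : d * d ≤ n
    · rw [if_pos hle, List.mem_append,
        ih (d + 1) x (by omega) (by push_cast at h ⊢; omega)]
      constructor
      · rintro (hx | ⟨e, h1, h2, h3, h4, h5⟩)
        · split_ifs at hx with hc
          · simp only [List.mem_singleton] at hx
            exact ⟨d, le_refl _, hle, hc.1, hc.2, hx⟩
          · simp at hx
        · exact ⟨e, by omega, h2, h3, h4, h5⟩
      · rintro ⟨e, h1, h2, h3, h4, h5⟩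
        by_cases he : e = d
        · subst he; left; simp [h3, h4, h5]
        · right; exact ⟨e, by omega, h2, h3, h4, h5⟩
    · rw [if_neg hle]
      simp only [List.not_mem_nil, false_iff]
      rintro ⟨e, h1, h2, _⟩
      have : d * d ≤ e * e := by nlinarith
      omega

-- exact-division facts for a positive divisor
theorem pvComplFacts (n e : Int) (hn : 1 ≤ n) (he : 1 ≤ e) (hdvd : e ∣ n) :
    (n / e) * e = n ∧ 1 ≤ n / e := by
  have h1 : n / e * e = n := Int.ediv_mul_cancel hdvd
  refine ⟨h1, ?_⟩
  by_contra hb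
  push_neg at hb
  nlinarith

-- a strictly smaller divisor gives a strictly larger complement
theorem pvComplAnti (n d e : Int) (hn : 1 ≤ n) (hd : 1 ≤ d) (hde : d < e)
    (h1 : d ∣ n) (h2 : e ∣ n) : n / e < n / d := by
  obtain ⟨ha, ha'⟩ := pvComplFacts n d hn hd h1
  obtain ⟨hb, hb'⟩ := pvComplFacts n e hn (by omega) h2
  nlinarith

theorem pairwise_Sfun (n : Int) (fuel : Nat) : ∀ (d : Int), 1 ≤ d → n - d + 1 ≤ (fuel : Int) →
    (Sfun fuel n d).Pairwise (· < ·) := by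
  induction fuel with
  | zero =>
    intro d hd h
    rw [Sfun]
    exact List.Pairwise.nil
  | succ fuel ih =>
    intro d hd h
    rw [Sfun]
    by_cases hle : d * d ≤ n
    · rw [if_pos hle]
      have hfuel : n - (d + 1) + 1 ≤ (fuel : Int) := by push_cast at h ⊢; omega
      refine List.pairwise_append.mpr ⟨?_, ih (d + 1) (by omega) hfuel, ?_⟩
      · split_ifs <;> simp
      · intro a ha b hb
        have hb' := (mem_Sfun n fuel (d + 1) b (by omega) hfuel).mp hb
        split_ifs at ha with hc
        · simp only [List.mem_singleton] at ha
          omega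
        · simp at ha
    · rw [if_neg hle]
      exact List.Pairwise.nil

theorem pairwise_Lfun (n : Int) (hn : 1 ≤ n) (fuel : Nat) : ∀ (d : Int), 1 ≤ d → n - d + 1 ≤ (fuel : Int) →
    (Lfun fuel n d).Pairwise (· > ·) := by
  induction fuel with
  | zero =>
    intro d hd h
    rw [Lfun]
    exact List.Pairwise.nil
  | succ fuel ih =>
    intro d hd h
    rw [Lfun]
    by_cases hle : d * d ≤ n
    · rw [if_pos hle]
      have hfuel : n - (d + 1) + 1 ≤ (fuel : Int) := by push_cast at h ⊢; omega
      refine List.pairwise_append.mpr ⟨?_, ih (d + 1) (by omega) hfuel, ?_⟩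
      · split_ifs <;> simp
      · intro a ha b hb
        obtain ⟨e, he1, he2, he3, he4, he5⟩ :=
          (mem_Lfun n fuel (d + 1) b (by omega) hfuel).mp hb
        split_ifs at ha with hc
        · simp only [List.mem_singleton] at ha
          subst ha
          rw [PySem.Int.floordiv_eq_ediv_of_pos (by omega)]
          rw [PySem.Int.floordiv_eq_ediv_of_pos (by omega)] at he5
          subst he5
          exact pvComplAnti n d e hn hd (by omega) hc.1 he3
        · simp at ha
    · rw [if_neg hle]
      exact List.Pairwise.nil

-- the fuel B's wrapper passes is always enough
theorem fuel_enough (n : Int) (hn : 2 ≤ n) : n - 2 + 1 ≤ (((n - 1).toNat : Nat) : Int) := by omega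

theorem Sfun_mem_facts (n x : Int) (hn : 2 ≤ n) (hx : x ∈ Sfun (n - 1).toNat n 2) :
    2 ≤ x ∧ x ≤ n ∧ x ∣ n ∧ x < n := by
  obtain ⟨h1, h2, h3⟩ := (mem_Sfun n (n - 1).toNat 2 x (by omega) (fuel_enough n hn)).mp hx
  have hxn : x ≤ n := by nlinarith
  have : x ≠ n := by
    rintro rfl
    nlinarith
  exact ⟨h1, hxn, h3, by omega⟩

theorem Lfun_mem_facts (n x : Int) (hn : 2 ≤ n) (hx : x ∈ Lfun (n - 1).toNat n 2) :
    2 ≤ x ∧ x < n ∧ x ∣ n ∧ n < x * x := by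
  obtain ⟨e, he1, he2, he3, he4, he5⟩ :=
    (mem_Lfun n (n - 1).toNat 2 x (by omega) (fuel_enough n hn)).mp hx
  rw [PySem.Int.floordiv_eq_ediv_of_pos (by omega)] at he5
  obtain ⟨hprod, hpos⟩ := pvComplFacts n e (by omega) (by omega) he3
  subst he5
  have hlt : e * e < n := lt_of_le_of_ne he2 he4
  have hex : e < n / e := by
    have h' : e * e < (n / e) * e := by omega
    exact lt_of_mul_lt_mul_right h' (by omega)
  refine ⟨by omega, by nlinarith, ⟨e, by linarith [hprod]⟩, by nlinarith⟩

theorem pairwise_combined (n : Int) (hn : 2 ≤ n) :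
    (Sfun (n - 1).toNat n 2 ++ ((Lfun (n - 1).toNat n 2).reverse ++ [n])).Pairwise (· < ·) := by
  refine List.pairwise_append.mpr
    ⟨pairwise_Sfun n (n - 1).toNat 2 (by omega) (fuel_enough n hn), ?_, ?_⟩
  · refine List.pairwise_append.mpr ⟨?_, by simp, ?_⟩
    · rw [List.pairwise_reverse]
      exact pairwise_Lfun n (by omega) (n - 1).toNat 2 (by omega) (fuel_enough n hn)
    · intro a ha b hb
      simp only [List.mem_singleton] at hb
      rw [hb]
      exact (Lfun_mem_facts n a hn (List.mem_reverse.mp ha)).2.1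
  · intro a ha b hb
    obtain ⟨ha1, ha2, ha3, ha4⟩ := Sfun_mem_facts n a hn ha
    rcases List.mem_append.mp hb with hb | hb
    · obtain ⟨hb1, hb2, hb3, hb4⟩ := Lfun_mem_facts n b hn (List.mem_reverse.mp hb)
      have haa : a * a ≤ n :=
        ((mem_Sfun n (n - 1).toNat 2 a (by omega) (fuel_enough n hn)).mp ha).2.1
      nlinarith
    · simp only [List.mem_singleton] at hb
      omega

theorem mem_combined (n x : Int) (hn : 2 ≤ n) :
    x ∈ Sfun (n - 1).toNat n 2 ++ ((Lfun (n - 1).toNat n 2).reverse ++ [n]) ↔ x ∈ divList n 2 := by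
  rw [mem_divList]
  simp only [List.mem_append, List.mem_reverse, List.mem_singleton]
  constructor
  · rintro (hx | hx | rfl)
    · obtain ⟨h1, h2, h3, _⟩ := Sfun_mem_facts n x hn hx
      exact ⟨h1, h2, h3⟩
    · obtain ⟨h1, h2, h3, _⟩ := Lfun_mem_facts n x hn hx
      exact ⟨h1, by omega, h3⟩
    · exact ⟨hn, le_refl _, dvd_refl _⟩
  · rintro ⟨h1, h2, h3⟩
    by_cases hs : x * x ≤ n
    · exact Or.inl ((mem_Sfun n (n - 1).toNat 2 x (by omega) (fuel_enough n hn)).mpr ⟨h1, hs, h3⟩)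
    by_cases hxn : x = n
    · exact Or.inr (Or.inr hxn)
    push_neg at hs
    refine Or.inr (Or.inl ?_)
    obtain ⟨hprod, hpos⟩ := pvComplFacts n x (by omega) (by omega) h3
    set e := n / x with he
    have hex : e < x := by
      have h' : e * x < x * x := by nlinarith
      exact lt_of_mul_lt_mul_right h' (by omega : (0:Int) ≤ x)
    have he2 : 2 ≤ e := by
      rcases lt_or_ge e 2 with hlt | hle
      · have he1 : e = 1 := by omega
        rw [he1] at hprod
        omega
      · exact hle
    refine (mem_Lfun n (n - 1).toNat 2 x (by omega) (fuel_enough n hn)).mpr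
      ⟨e, he2, by nlinarith, ⟨x, by linarith [hprod]⟩, by nlinarith, ?_⟩
    rw [PySem.Int.floordiv_eq_ediv_of_pos (by omega)]
    have : x * e = n := by linarith [hprod]
    rw [← this, Int.mul_ediv_cancel x (by omega)]

theorem combined_eq (n : Int) (hn : 2 ≤ n) :
    Sfun (n - 1).toNat n 2 ++ ((Lfun (n - 1).toNat n 2).reverse ++ [n]) = divList n 2 := by
  have hp1 := pairwise_combined n hn
  have hp2 := pairwise_divList n 2
  have hnd1 : (Sfun (n - 1).toNat n 2 ++ ((Lfun (n - 1).toNat n 2).reverse ++ [n])).Nodup :=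
    hp1.imp (fun h => ne_of_lt h)
  have hnd2 : (divList n 2).Nodup := hp2.imp (fun h => ne_of_lt h)
  have hperm : (Sfun (n - 1).toNat n 2 ++ ((Lfun (n - 1).toNat n 2).reverse ++ [n])).Perm (divList n 2) :=
    (List.perm_ext_iff_of_nodup hnd1 hnd2).mpr (fun x => mem_combined n x hn)
  exact List.Perm.eq_of_pairwise (fun a b _ _ h1 h2 => le_antisymm h1 h2)
    (hp1.imp (fun h => le_of_lt h)) (hp2.imp (fun h => le_of_lt h)) hperm

theorem B_char (n : Int) (hn : 2 ≤ n) :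
    get_smallest_divisors_alt n = (divList n 2).take 5 := by
  rw [get_smallest_divisors_alt, if_neg (by omega)]
  show ((pvLoopB (n - 1).toNat n 2 [] [n]).1 ++ (pvLoopB (n - 1).toNat n 2 [] [n]).2.reverse).take 5 = _
  rw [pvLoopB_eq]
  simp only [List.nil_append, List.singleton_append, List.reverse_cons]
  rw [← combined_eq n hn]

-- ===== VERDICT (by name: the statement is the Claim_ definition above) =====
theorem get_smallest_divisors_spec : Claim_equal_get_smallest_divisors := by
  intro n _
  unfold Spec_get_smallest_divisors
  rcases lt_or_ge n 2 with hn | hn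
  · rw [A_char, get_smallest_divisors_alt, if_pos hn, divList_empty n 2 (by omega)]
    rfl
  · rw [A_char, B_char n hn]
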